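-- pv_equiv track=rewrite | github.com/jstockdale/rfcensus | rfcensus/hardware/serialization.py | _last_error_line
-- ===== SOURCE A (Python) =====
-- def _last_error_line(text: str) -> str | None:
--     """Return the most error-like line in the output.
--
--     Prefers stderr-style lines (containing 'error', 'failed', 'cannot',
--     etc.) over informational ones. Falls back to the last non-empty line.
--     """
--     error_keywords = ("error", "failed", "cannot", "denied", "no such", "unable")
--     candidates: list[str] = []
--     for line in text.splitlines():
--         line = line.strip()
--         if not line:
--             continue
--         # Skip device-list lines and the "Using device N" status line
--         if line.startswith("Found ") or line.startswith("Using ") or line.startswith("Current "):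
--             continue
--         if line.startswith(("0:", "1:", "2:", "3:", "4:", "5:", "6:", "7:", "8:", "9:")):
--             continue  # device-list entry like "  0:  Generic RTL2832U OEM"
--         candidates.append(line)
--     # Prefer lines with error keywords
--     for line in reversed(candidates):
--         if any(kw in line.lower() for kw in error_keywords):
--             return line
--     # Fall back to the last meaningful line
--     return candidates[-1] if candidates else None
-- ===== SOURCE B (Python) =====
-- def _last_error_line(text: str) -> str | None:
--     """Single forward pass: track the last kept line and the last error-like line."""
--     error_keywords = ("error", "failed", "cannot", "denied", "no such", "unable")
--     last_error = None
--     last_candidate = None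
--     for line in text.splitlines():
--         line = line.strip()
--         if not line:
--             continue
--         if line.startswith("Found ") or line.startswith("Using ") or line.startswith("Current "):
--             continue
--         if line[0] in "0123456789" and line[1:2] == ":":
--             continue
--         last_candidate = line
--         if any(kw in line.lower() for kw in error_keywords):
--             last_error = line
--     return last_error if last_error is not None else last_candidate
-- ===== Notes on version B (the rewrite author's own statement) =====
-- stated objective: simpler
-- what changed: Replaces A's intermediate candidates list plus a second reversed() scan with a single forward pass that maintains two scalars (last kept line, last keyword-bearing line) and picks the error line, falling back to the last kept line.
import Mathlib
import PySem

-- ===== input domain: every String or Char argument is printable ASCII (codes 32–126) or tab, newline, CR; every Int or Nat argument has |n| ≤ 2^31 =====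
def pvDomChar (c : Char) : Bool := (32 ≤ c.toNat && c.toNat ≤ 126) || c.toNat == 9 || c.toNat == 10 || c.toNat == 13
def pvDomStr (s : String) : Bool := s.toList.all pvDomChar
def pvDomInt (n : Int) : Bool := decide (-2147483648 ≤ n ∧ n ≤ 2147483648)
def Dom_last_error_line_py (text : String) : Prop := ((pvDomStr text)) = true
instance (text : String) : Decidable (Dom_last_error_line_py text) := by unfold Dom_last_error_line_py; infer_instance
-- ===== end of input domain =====

-- B replaces A's candidates list plus reversed() rescan by a single forward pass keeping two
-- scalars (last kept line, last error-like line): simpler, and the same return value.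

def pvErrKeywords : List String := ["error", "failed", "cannot", "denied", "no such", "unable"]

-- ===== PORT A =====
def last_error_line_py (text : String) : Option String :=
  let candidates := (PySem.Str.splitlines text).foldl (fun acc line =>
    let l := PySem.Str.strip line
    if l = "" then acc
    else if PySem.Str.startswith l "Found " || PySem.Str.startswith l "Using " ||
            PySem.Str.startswith l "Current " then acc
    else if PySem.Str.startswith l "0:" || PySem.Str.startswith l "1:" ||
            PySem.Str.startswith l "2:" || PySem.Str.startswith l "3:" ||
            PySem.Str.startswith l "4:" || PySem.Str.startswith l "5:" ||
            PySem.Str.startswith l "6:" || PySem.Str.startswith l "7:" ||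
            PySem.Str.startswith l "8:" || PySem.Str.startswith l "9:" then acc
    else acc ++ [l]) []
  match candidates.reverse.find?
      (fun l => pvErrKeywords.any (fun kw => PySem.Str.isIn kw (PySem.Str.lower l))) with
  | some l => some l
  | none => if candidates.isEmpty then none else PySem.List.pyGet? candidates (-1)

-- ===== PORT B =====
-- 'line[0] in "0123456789"' is ported via pyGet? (exact: some/none mirrors IndexError, unreachable
-- here since the line is non-empty); 'line[1:2] == ":"' via Chars.slice on toList (exact: step-1 slice).
def last_error_line_py_alt (text : String) : Option String :=
  let st := (PySem.Str.splitlines text).foldl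
    (fun (st : Option String × Option String) line =>
      let l := PySem.Str.strip line
      if l = "" then st
      else if PySem.Str.startswith l "Found " || PySem.Str.startswith l "Using " ||
              PySem.Str.startswith l "Current " then st
      else if (match PySem.Str.pyGet? l 0 with
               | some c => "0123456789".toList.contains c &&
                           PySem.Chars.slice l.toList (some 1) (some 2) == [':']
               | none => false) then st
      else ((if pvErrKeywords.any (fun kw => PySem.Str.isIn kw (PySem.Str.lower l))
             then some l else st.1), some l))
    (none, none)
  match st.1 with
  | some e => some e
  | none => st.2

-- ===== PRECONDITION & SPEC =====
def Spec_last_error_line_py (text : String) (out : Option String) : Prop := out = last_error_line_py_alt text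
instance (text : String) (out : Option String) : Decidable (Spec_last_error_line_py text out) := by unfold Spec_last_error_line_py; infer_instance

-- ===== CLAIM (what is proved, stated in full; the proofs are below) =====
def Claim_equal_last_error_line_py : Prop := ∀ (text : String), Dom_last_error_line_py text → Spec_last_error_line_py text (last_error_line_py text)

-- ===== LEMMAS AND PROOFS =====

-- the shared keep/skip decision, as an Option-valued filter (none = the line is skipped)
def pvKeep (line : String) : Option String :=
  let l := PySem.Str.strip line
  if l = "" then none
  else if PySem.Str.startswith l "Found " || PySem.Str.startswith l "Using " ||
          PySem.Str.startswith l "Current " then none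
  else if PySem.Str.startswith l "0:" || PySem.Str.startswith l "1:" ||
          PySem.Str.startswith l "2:" || PySem.Str.startswith l "3:" ||
          PySem.Str.startswith l "4:" || PySem.Str.startswith l "5:" ||
          PySem.Str.startswith l "6:" || PySem.Str.startswith l "7:" ||
          PySem.Str.startswith l "8:" || PySem.Str.startswith l "9:" then none
  else some l

theorem pvGet_cons (c : Char) (t : List Char) : PySem.List.pyGet? (c :: t) 0 = some c := by
  simp [PySem.List.pyGet?, PySem.List.pyIdx?]

theorem pvSlice12 (c : Char) (t : List Char) :
    PySem.List.slice (c :: t) (some 1) (some 2) = t.take 1 := by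
  rw [PySem.List.slice_toNat _ (by norm_num) (by norm_num)]
  simp

-- B's first-char digit test equals A's startswith-"d:" disjunction
set_option maxRecDepth 8192 in
theorem pvDigit_eq (l : String) :
    (match PySem.Str.pyGet? l 0 with
     | some c => "0123456789".toList.contains c &&
                 PySem.Chars.slice l.toList (some 1) (some 2) == [':']
     | none => false)
    = (PySem.Str.startswith l "0:" || PySem.Str.startswith l "1:" ||
       PySem.Str.startswith l "2:" || PySem.Str.startswith l "3:" ||
       PySem.Str.startswith l "4:" || PySem.Str.startswith l "5:" ||
       PySem.Str.startswith l "6:" || PySem.Str.startswith l "7:" ||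
       PySem.Str.startswith l "8:" || PySem.Str.startswith l "9:") := by
  simp only [PySem.Str.pyGet?_eq, PySem.Str.startswith_eq, PySem.Chars.slice, PySem.Chars.pyGet?]
  generalize l.toList = cs
  match cs with
  | [] =>
    simp [PySem.List.pyGet?, PySem.List.pyIdx?, PySem.Chars.startswith]
  | [c] =>
    simp [pvGet_cons, pvSlice12, PySem.Chars.startswith, List.isPrefixOf]
  | c :: d :: t =>
    rw [pvGet_cons]
    dsimp only
    simp [pvSlice12, PySem.Chars.startswith, List.isPrefixOf, BEq.comm,
          show "0123456789".toList = ['0','1','2','3','4','5','6','7','8','9'] from rfl]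
    rw [Bool.eq_iff_iff]
    simp only [Bool.or_eq_true, Bool.and_eq_true, decide_eq_true_eq, beq_iff_eq]
    tauto

-- A's candidate-building fold appends exactly the pvKeep-kept lines
theorem pvFoldA (ls : List String) (acc : List String) :
    ls.foldl (fun acc line =>
      let l := PySem.Str.strip line
      if l = "" then acc
      else if PySem.Str.startswith l "Found " || PySem.Str.startswith l "Using " ||
              PySem.Str.startswith l "Current " then acc
      else if PySem.Str.startswith l "0:" || PySem.Str.startswith l "1:" ||
              PySem.Str.startswith l "2:" || PySem.Str.startswith l "3:" ||
              PySem.Str.startswith l "4:" || PySem.Str.startswith l "5:" ||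
              PySem.Str.startswith l "6:" || PySem.Str.startswith l "7:" ||
              PySem.Str.startswith l "8:" || PySem.Str.startswith l "9:" then acc
      else acc ++ [l]) acc
    = acc ++ ls.filterMap pvKeep := by
  induction ls generalizing acc with
  | nil => simp
  | cons x xs ih =>
    rw [List.foldl_cons]
    dsimp only
    by_cases h1 : PySem.Str.strip x = ""
    · rw [if_pos h1, List.filterMap_cons_none
        (show pvKeep x = none from by unfold pvKeep; dsimp only; rw [if_pos h1])]
      exact ih acc
    rw [if_neg h1]
    by_cases h2 : (PySem.Str.startswith (PySem.Str.strip x) "Found " ||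
        PySem.Str.startswith (PySem.Str.strip x) "Using " ||
        PySem.Str.startswith (PySem.Str.strip x) "Current ") = true
    · rw [if_pos h2, List.filterMap_cons_none
        (show pvKeep x = none from by unfold pvKeep; dsimp only; rw [if_neg h1, if_pos h2])]
      exact ih acc
    rw [if_neg h2]
    by_cases h3 : (PySem.Str.startswith (PySem.Str.strip x) "0:" ||
        PySem.Str.startswith (PySem.Str.strip x) "1:" ||
        PySem.Str.startswith (PySem.Str.strip x) "2:" ||
        PySem.Str.startswith (PySem.Str.strip x) "3:" ||
        PySem.Str.startswith (PySem.Str.strip x) "4:" ||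
        PySem.Str.startswith (PySem.Str.strip x) "5:" ||
        PySem.Str.startswith (PySem.Str.strip x) "6:" ||
        PySem.Str.startswith (PySem.Str.strip x) "7:" ||
        PySem.Str.startswith (PySem.Str.strip x) "8:" ||
        PySem.Str.startswith (PySem.Str.strip x) "9:") = true
    · rw [if_pos h3, List.filterMap_cons_none
        (show pvKeep x = none from by
          unfold pvKeep; dsimp only; rw [if_neg h1, if_neg h2, if_pos h3])]
      exact ih acc
    rw [if_neg h3, List.filterMap_cons_some
        (show pvKeep x = some (PySem.Str.strip x) from by
          unfold pvKeep; dsimp only; rw [if_neg h1, if_neg h2, if_neg h3])]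
    rw [ih (acc ++ [PySem.Str.strip x])]
    simp

-- B's fold equals the two-scalar fold over the pvKeep-kept lines
theorem pvFoldB (ls : List String) (st : Option String × Option String) :
    ls.foldl (fun (st : Option String × Option String) line =>
      let l := PySem.Str.strip line
      if l = "" then st
      else if PySem.Str.startswith l "Found " || PySem.Str.startswith l "Using " ||
              PySem.Str.startswith l "Current " then st
      else if (match PySem.Str.pyGet? l 0 with
               | some c => "0123456789".toList.contains c &&
                           PySem.Chars.slice l.toList (some 1) (some 2) == [':']
               | none => false) then st
      else ((if pvErrKeywords.any (fun kw => PySem.Str.isIn kw (PySem.Str.lower l))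
             then some l else st.1), some l)) st
    = (ls.filterMap pvKeep).foldl
        (fun st l => ((if pvErrKeywords.any (fun kw => PySem.Str.isIn kw (PySem.Str.lower l))
                       then some l else st.1), some l)) st := by
  induction ls generalizing st with
  | nil => simp
  | cons x xs ih =>
    rw [List.foldl_cons]
    dsimp only
    rw [pvDigit_eq (PySem.Str.strip x)]
    by_cases h1 : PySem.Str.strip x = ""
    · rw [if_pos h1, List.filterMap_cons_none
        (show pvKeep x = none from by unfold pvKeep; dsimp only; rw [if_pos h1])]
      exact ih st
    rw [if_neg h1]
    by_cases h2 : (PySem.Str.startswith (PySem.Str.strip x) "Found " ||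
        PySem.Str.startswith (PySem.Str.strip x) "Using " ||
        PySem.Str.startswith (PySem.Str.strip x) "Current ") = true
    · rw [if_pos h2, List.filterMap_cons_none
        (show pvKeep x = none from by unfold pvKeep; dsimp only; rw [if_neg h1, if_pos h2])]
      exact ih st
    rw [if_neg h2]
    by_cases h3 : (PySem.Str.startswith (PySem.Str.strip x) "0:" ||
        PySem.Str.startswith (PySem.Str.strip x) "1:" ||
        PySem.Str.startswith (PySem.Str.strip x) "2:" ||
        PySem.Str.startswith (PySem.Str.strip x) "3:" ||
        PySem.Str.startswith (PySem.Str.strip x) "4:" ||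
        PySem.Str.startswith (PySem.Str.strip x) "5:" ||
        PySem.Str.startswith (PySem.Str.strip x) "6:" ||
        PySem.Str.startswith (PySem.Str.strip x) "7:" ||
        PySem.Str.startswith (PySem.Str.strip x) "8:" ||
        PySem.Str.startswith (PySem.Str.strip x) "9:") = true
    · rw [if_pos h3, List.filterMap_cons_none
        (show pvKeep x = none from by
          unfold pvKeep; dsimp only; rw [if_neg h1, if_neg h2, if_pos h3])]
      exact ih st
    rw [if_neg h3, List.filterMap_cons_some
        (show pvKeep x = some (PySem.Str.strip x) from by
          unfold pvKeep; dsimp only; rw [if_neg h1, if_neg h2, if_neg h3])]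
    rw [List.foldl_cons]
    exact ih _

-- the two-scalar fold computes (last error-like kept line, last kept line)
theorem pvFoldC (cs : List String) :
    cs.foldl (fun (st : Option String × Option String) l =>
        ((if pvErrKeywords.any (fun kw => PySem.Str.isIn kw (PySem.Str.lower l))
          then some l else st.1), some l)) (none, none)
    = (cs.reverse.find?
         (fun l => pvErrKeywords.any (fun kw => PySem.Str.isIn kw (PySem.Str.lower l))),
       cs.getLast?) := by
  induction cs using List.reverseRecOn with
  | nil => simp
  | append_singleton cs x ih =>
    rw [List.foldl_append, ih]
    simp only [List.foldl_cons, List.foldl_nil, List.reverse_append, List.reverse_cons,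
      List.reverse_nil, List.nil_append, List.cons_append, List.find?_cons]
    cases h : pvErrKeywords.any (fun kw => PySem.Str.isIn kw (PySem.Str.lower x)) <;> simp [h]

-- ===== VERDICT (by name: the statement is the Claim_ definition above) =====
theorem last_error_line_py_spec : Claim_equal_last_error_line_py := by
  intro text _
  unfold Spec_last_error_line_py last_error_line_py last_error_line_py_alt
  rw [pvFoldA, pvFoldB, pvFoldC]
  simp only [List.nil_append]
  cases hf : (List.filterMap pvKeep (PySem.Str.splitlines text)).reverse.find?
      (fun l => pvErrKeywords.any (fun kw => PySem.Str.isIn kw (PySem.Str.lower l))) with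
  | some l => simp [hf]
  | none =>
    simp only [hf]
    cases hcse : List.filterMap pvKeep (PySem.Str.splitlines text) with
    | nil => simp
    | cons a t =>
      simp [PySem.List.pyGet?, PySem.List.pyIdx?, List.getLast?_eq_getElem?]
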